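-- pv_equiv track=rewrite | github.com/gregvanhoudt/AITIA-PM | utilities.py | count_effect
-- ===== SOURCE A (Python) =====
-- def count_effect(e_trues, windows):
--     """
--     Get the number of times where e is true in the provided time windows.
--
--     Parameters:
--         e_trues: the timepoints where e is true.
--         windows: a list of windows, i.e. c_and_x and not_c_and_x.
--
--     Returns:
--         The number of times (Int) e was true in the provided time windows.
--     """
--     res = 0
--
--     for (ws, we), intersection in windows:
--         for e in e_trues:
--             e_cases = e_trues[e]
--             inter = [e_case for e_case in e_cases if e_case in intersection]
--             if e >= ws and e <= we and len(inter) is not 0: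
--                 res += 1
--                 break
--
--     return(res)
-- ===== SOURCE B (Python) =====
-- def _bisect_left(keys, x):
--     lo, hi = 0, len(keys)
--     while lo < hi:
--         mid = (lo + hi) // 2
--         if keys[mid] < x:
--             lo = mid + 1
--         else:
--             hi = mid
--     return lo
--
--
-- def _bisect_right(keys, x):
--     lo, hi = 0, len(keys)
--     while lo < hi:
--         mid = (lo + hi) // 2
--         if x < keys[mid]:
--             hi = mid
--         else:
--             lo = mid + 1
--     return lo
--
--
-- def count_effect(e_trues, windows):
--     keys = sorted(e_trues)
--     res = 0
--     for (ws, we), intersection in windows: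
--         inter_set = set(intersection)
--         for k in keys[_bisect_left(keys, ws):_bisect_right(keys, we)]:
--             if not inter_set.isdisjoint(e_trues[k]):
--                 res += 1
--                 break
--     return res
-- ===== Notes on version B (the rewrite author's own statement) =====
-- stated objective: faster
-- what changed: Sorts the e_trues keys once and, per window, binary-searches (hand-written bisect_left/bisect_right) the [ws,we] key range and tests overlap against a set of the window's intersection, instead of rescanning every key and building a filtered list per key.
import Mathlib
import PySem

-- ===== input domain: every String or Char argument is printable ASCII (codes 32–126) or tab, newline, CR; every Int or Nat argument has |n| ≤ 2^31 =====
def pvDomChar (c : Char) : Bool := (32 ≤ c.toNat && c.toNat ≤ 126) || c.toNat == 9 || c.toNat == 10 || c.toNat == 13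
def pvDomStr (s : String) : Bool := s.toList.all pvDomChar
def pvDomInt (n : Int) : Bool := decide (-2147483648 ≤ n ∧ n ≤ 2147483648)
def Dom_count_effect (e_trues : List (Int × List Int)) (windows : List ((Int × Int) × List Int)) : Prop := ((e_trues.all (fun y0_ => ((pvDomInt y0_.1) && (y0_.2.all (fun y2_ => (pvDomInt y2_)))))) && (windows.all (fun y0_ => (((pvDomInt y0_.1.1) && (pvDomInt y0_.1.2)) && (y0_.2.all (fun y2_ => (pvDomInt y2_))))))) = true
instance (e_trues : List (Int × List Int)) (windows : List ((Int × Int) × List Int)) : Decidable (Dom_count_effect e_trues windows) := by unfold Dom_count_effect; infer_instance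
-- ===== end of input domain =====

-- B sorts the dict keys once and per window binary-searches (bisect) the in-range key slice,
-- testing overlap against a set of the window's intersection; objective: faster (index + range query per window).


-- ===== PORT A =====
-- e_trues is a Python dict (assoc list under the type convention); both ports build the
-- PySem.Dict exactly as Python's dict construction does (later duplicate keys overwrite).
-- inner 'for e in e_trues: ... if ...: res += 1; break' — recursion over the key list, stop at first hit
def pvAInner (d : PySem.Dict Int (List Int)) (ws we : Int) (intersection : List Int) : List Int → Bool
  | [] => false
  | e :: rest =>
    let e_cases := d.getD e []
    let inter := e_cases.filter (fun e_case => intersection.contains e_case)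
    if ws ≤ e ∧ e ≤ we ∧ inter.length ≠ 0 then true
    else pvAInner d ws we intersection rest

def count_effect (e_trues : List (Int × List Int)) (windows : List ((Int × Int) × List Int)) : Int :=
  let d := PySem.Dict.ofList e_trues
  windows.foldl (fun res w => if pvAInner d w.1.1 w.1.2 w.2 d.keys then res + 1 else res) 0

-- ===== PORT B =====
-- Source B's hand-written _bisect_left/_bisect_right are exactly bisect.bisect_left/bisect_right,
-- ported as the PySem primitives; keys[lo:hi] with 0 ≤ lo, hi is (keys.drop lo).take (hi - lo).
def count_effect_alt (e_trues : List (Int × List Int)) (windows : List ((Int × Int) × List Int)) : Int :=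
  let d := PySem.Dict.ofList e_trues
  let keys := PySem.List.sorted d.keys (fun k => k) false
  windows.foldl (fun res w =>
    let inter_set := PySem.Set.ofList w.2
    let lo := PySem.List.bisectLeft keys w.1.1
    let hi := PySem.List.bisectRight keys w.1.2
    if ((keys.drop lo).take (hi - lo)).any
        (fun k => !(PySem.Set.isdisjoint inter_set (d.getD k []))) then res + 1 else res) 0

-- ===== PRECONDITION & SPEC =====
def Spec_count_effect (e_trues : List (Int × List Int)) (windows : List ((Int × Int) × List Int)) (out : Int) : Prop := out = count_effect_alt e_trues windows
instance (e_trues : List (Int × List Int)) (windows : List ((Int × Int) × List Int)) (out : Int) : Decidable (Spec_count_effect e_trues windows out) := by unfold Spec_count_effect; infer_instance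

-- ===== CLAIM (what is proved, stated in full; the proofs are below) =====
def Claim_equal_count_effect : Prop := ∀ (e_trues : List (Int × List Int)) (windows : List ((Int × Int) × List Int)), Dom_count_effect e_trues windows → Spec_count_effect e_trues windows (count_effect e_trues windows)

-- ===== LEMMAS AND PROOFS =====

-- A's inner loop-with-break is an existence test over the key list
theorem pvAInner_eq_any (d : PySem.Dict Int (List Int)) (ws we : Int) (inter : List Int)
    (l : List Int) :
    pvAInner d ws we inter l =
      l.any (fun e => decide (ws ≤ e ∧ e ≤ we ∧
        ((d.getD e []).filter (fun c => inter.contains c)).length ≠ 0)) := by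
  induction l with
  | nil => rfl
  | cons e rest ih =>
    rw [List.any_cons, ← ih]
    show (if ws ≤ e ∧ e ≤ we ∧ _ then true else _) = _
    by_cases h : ws ≤ e ∧ e ≤ we ∧
        ((d.getD e []).filter (fun c => inter.contains c)).length ≠ 0
    · rw [if_pos h, decide_eq_true h, Bool.true_or]
    · rw [if_neg h, decide_eq_false h, Bool.false_or]

-- membership in the bisected slice of a sorted list = range condition
theorem pv_mem_seg_iff (K : List Int) (hK : K.Pairwise (· ≤ ·)) (ws we k : Int) :
    k ∈ (K.drop (PySem.List.bisectLeft K ws)).take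
          (PySem.List.bisectRight K we - PySem.List.bisectLeft K ws) ↔
      k ∈ K ∧ ws ≤ k ∧ k ≤ we := by
  obtain ⟨hlo_le, hlo1, hlo2⟩ := PySem.List.bisectLeft_spec K ws hK
  obtain ⟨hhi_le, hhi1, hhi2⟩ := PySem.List.bisectRight_spec K we hK
  set lo := PySem.List.bisectLeft K ws with hlo
  set hi := PySem.List.bisectRight K we with hhi
  constructor
  · intro hmem
    rw [List.mem_iff_getElem] at hmem
    obtain ⟨j, hj, hje⟩ := hmem
    have hjlen : j < hi - lo := lt_of_lt_of_le hj (List.length_take_le _ _)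
    have hjd : j < (K.drop lo).length := by
      have := hj; simpa using lt_of_lt_of_le hj (by simp [List.length_take])
    have hlen : lo + j < K.length := by
      have := hjd; simp [List.length_drop] at this; omega
    have hke : K[lo + j] = k := by
      rw [List.getElem_take, List.getElem_drop] at hje; exact hje
    refine ⟨hke ▸ List.getElem_mem _, ?_, ?_⟩
    · have := hlo2 (lo + j) hlen (Nat.le_add_right _ _); omega
    · have := hhi1 (lo + j) hlen (by omega); omega
  · rintro ⟨hmem, h1, h2⟩
    rw [List.mem_iff_getElem] at hmem
    obtain ⟨i, hi', hie⟩ := hmem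
    have hge : lo ≤ i := by
      by_contra h
      have := hlo1 i hi' (by omega); omega
    have hlt : i < hi := by
      by_contra h
      have := hhi2 i hi' (by omega); omega
    rw [List.mem_iff_getElem]
    refine ⟨i - lo, ?_, ?_⟩
    · simp [List.length_take, List.length_drop]; omega
    · have h' : lo + (i - lo) = i := by omega
      simp only [List.getElem_take, List.getElem_drop, h']
      exact hie
  
-- per-window: A's scan over all keys = B's test on the bisected slice of the sorted keys
theorem pv_window_eq (d : PySem.Dict Int (List Int)) (ws we : Int) (inter : List Int) :
    pvAInner d ws we inter d.keys =
      (((PySem.List.sorted d.keys (fun k => k) false).drop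
          (PySem.List.bisectLeft (PySem.List.sorted d.keys (fun k => k) false) ws)).take
          (PySem.List.bisectRight (PySem.List.sorted d.keys (fun k => k) false) we -
           PySem.List.bisectLeft (PySem.List.sorted d.keys (fun k => k) false) ws)).any
        (fun k => !(PySem.Set.isdisjoint (PySem.Set.ofList inter) (d.getD k []))) := by
  rw [pvAInner_eq_any]
  set K := PySem.List.sorted d.keys (fun k => k) false with hKdef
  have hK : K.Pairwise (· ≤ ·) := by
    have := PySem.List.sorted_pairwise d.keys (fun k => k)
    simpa using this
  rw [Bool.eq_iff_iff]
  simp only [List.any_eq_true, decide_eq_true_eq]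
  constructor
  · rintro ⟨e, he, h1, h2, h3⟩
    refine ⟨e, (pv_mem_seg_iff K hK ws we e).2 ⟨?_, h1, h2⟩, ?_⟩
    · rw [hKdef, PySem.List.mem_sorted]; exact he
    · have hne : ((d.getD e []).filter (fun c => inter.contains c)) ≠ [] := by
        intro hnil; exact h3 (by rw [hnil]; rfl)
      obtain ⟨c, hc⟩ := List.exists_mem_of_ne_nil _ hne
      rw [List.mem_filter] at hc
      simp only [Bool.not_eq_eq_eq_not, Bool.not_true, Bool.eq_false_iff, ne_eq]
      intro hdis
      rw [PySem.Set.isdisjoint_iff] at hdis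
      exact hdis c (by exact (PySem.Set.mem_ofList _ _).2 ((List.contains_iff_mem).1 hc.2)) hc.1
  · rintro ⟨k, hk, hp⟩
    obtain ⟨hmem, h1, h2⟩ := (pv_mem_seg_iff K hK ws we k).1 hk
    refine ⟨k, ?_, h1, h2, ?_⟩
    · rw [hKdef, PySem.List.mem_sorted] at hmem; exact hmem
    · simp only [Bool.not_eq_eq_eq_not, Bool.not_true, Bool.eq_false_iff, ne_eq] at hp
      have hex : ¬ (∀ x ∈ PySem.Set.ofList inter, x ∉ d.getD k []) := by
        intro h; exact hp ((PySem.Set.isdisjoint_iff _ _).2 h)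
      push Not at hex
      obtain ⟨c, hc1, hc2⟩ := hex
      have hcm : c ∈ (d.getD k []).filter (fun c => inter.contains c) :=
        List.mem_filter.2 ⟨hc2, List.contains_iff_mem.2 ((PySem.Set.mem_ofList _ _).1 hc1)⟩
      have := List.length_pos_of_mem hcm
      omega

-- ===== VERDICT (by name: the statement is the Claim_ definition above) =====
theorem pv_fold_eq (d : PySem.Dict Int (List Int)) :
    ∀ (windows : List ((Int × Int) × List Int)) (res : Int),
    windows.foldl (fun res w => if pvAInner d w.1.1 w.1.2 w.2 d.keys then res + 1 else res) res =
    windows.foldl (fun res w =>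
      if (((PySem.List.sorted d.keys (fun k => k) false).drop
            (PySem.List.bisectLeft (PySem.List.sorted d.keys (fun k => k) false) w.1.1)).take
            (PySem.List.bisectRight (PySem.List.sorted d.keys (fun k => k) false) w.1.2 -
             PySem.List.bisectLeft (PySem.List.sorted d.keys (fun k => k) false) w.1.1)).any
          (fun k => !(PySem.Set.isdisjoint (PySem.Set.ofList w.2) (d.getD k []))) then res + 1
      else res) res
  | [], _ => rfl
  | w :: ws, res => by
    rw [List.foldl_cons, List.foldl_cons, pv_window_eq]
    exact pv_fold_eq d ws _

theorem count_effect_spec : Claim_equal_count_effect := by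
  intro e_trues windows _
  unfold Spec_count_effect count_effect count_effect_alt
  exact pv_fold_eq (PySem.Dict.ofList e_trues) windows 0
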